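-- pv_equiv track=rewrite | github.com/keg-tucn/AMR | DependencyExtractor.py | splitWithIndices
-- ===== SOURCE A (Python) =====
-- from itertools import groupby
--
-- def splitWithIndices(string, splitChar=' '):
--     p = 0
--     start_indices = {}
--     current_token = 0
--     for k, g in groupby(string, lambda x: x == splitChar):
--         q = p + sum(1 for i in g)
--         if not k:
--             start_indices[p] = current_token
--             current_token += 1
--         p = q
--     return start_indices
-- ===== SOURCE B (Python) =====
-- def splitWithIndices(string, splitChar=' '):
--     start_indices = {}
--     pos = 0
--     current_token = 0
--     prev_is_split = True
--     for c in string: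
--         is_split = (c == splitChar)
--         if not is_split and prev_is_split:
--             start_indices[pos] = current_token
--             current_token += 1
--         prev_is_split = is_split
--         pos += 1
--     return start_indices
-- ===== Notes on version B (the rewrite author's own statement) =====
-- stated objective: simpler
-- what changed: Replaced the itertools.groupby run-grouping (with an inner sum() pass per group) by a single character-level scan maintaining a position counter and a prev_is_split boolean, recording a token start when a non-split char follows a split state.
import Mathlib
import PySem

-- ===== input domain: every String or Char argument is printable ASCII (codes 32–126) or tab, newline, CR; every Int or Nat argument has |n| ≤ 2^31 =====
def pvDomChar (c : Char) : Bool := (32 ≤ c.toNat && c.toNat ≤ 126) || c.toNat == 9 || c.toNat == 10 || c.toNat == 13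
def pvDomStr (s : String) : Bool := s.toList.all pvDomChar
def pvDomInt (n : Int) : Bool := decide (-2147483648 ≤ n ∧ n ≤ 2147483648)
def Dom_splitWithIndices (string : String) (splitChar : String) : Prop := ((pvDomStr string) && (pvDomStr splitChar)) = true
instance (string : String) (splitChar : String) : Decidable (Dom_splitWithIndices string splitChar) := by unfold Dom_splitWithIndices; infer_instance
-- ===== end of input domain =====

-- B replaces A's itertools.groupby run-grouping by a single character scan with a prev-state boolean (simpler decomposition, same O(n) cost).


-- ===== PORT A =====
-- x == splitChar for a one-char x: exact as list equality of the char lists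
def pvIsSplit (splitChar : String) (c : Char) : Bool := splitChar.toList == [c]

-- itertools.groupby(string, key): the list of (key, run length) for maximal runs of equal key
def pvGroups (sc : String) (cs : List Char) : List (Bool × Nat) :=
  match cs with
  | [] => []
  | c :: rest =>
    let k := pvIsSplit sc c
    (k, (rest.takeWhile (fun d => pvIsSplit sc d == k)).length + 1) ::
      pvGroups sc (rest.dropWhile (fun d => pvIsSplit sc d == k))
termination_by cs.length
decreasing_by
  simp only [List.length_cons]
  exact Nat.lt_succ_of_le (List.length_dropWhile_le _ _)

def splitWithIndices (string : String) (splitChar : String) : List (Int × Int) :=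
  (((pvGroups splitChar string.toList).foldl
      (fun (st : Int × PySem.Dict Int Int × Int) g =>
        let q : Int := st.1 + (g.2 : Int)
        if !g.1 then (q, st.2.1.insert st.1 st.2.2, st.2.2 + 1)
        else (q, st.2.1, st.2.2))
      (0, PySem.Dict.empty, 0)).2.1).items

-- ===== PORT B =====
def splitWithIndices_alt (string : String) (splitChar : String) : List (Int × Int) :=
  ((string.toList.foldl
      (fun (st : Int × Bool × Int × PySem.Dict Int Int) c =>
        let isSplit := splitChar.toList == [c]
        if !isSplit && st.2.1 then (st.1 + 1, isSplit, st.2.2.1 + 1, st.2.2.2.insert st.1 st.2.2.1)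
        else (st.1 + 1, isSplit, st.2.2.1, st.2.2.2))
      (0, true, 0, PySem.Dict.empty)).2.2.2).items

-- ===== PRECONDITION & SPEC =====
def Spec_splitWithIndices (string : String) (splitChar : String) (out : List (Int × Int)) : Prop := out = splitWithIndices_alt string splitChar
instance (string : String) (splitChar : String) (out : List (Int × Int)) : Decidable (Spec_splitWithIndices string splitChar out) := by unfold Spec_splitWithIndices; infer_instance

-- ===== CLAIM (what is proved, stated in full; the proofs are below) =====
def Claim_equal_splitWithIndices : Prop := ∀ (string : String) (splitChar : String), Dom_splitWithIndices string splitChar → Spec_splitWithIndices string splitChar (splitWithIndices string splitChar)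

-- ===== LEMMAS AND PROOFS =====

-- abbreviations for the two fold steps (proof-side only)
def pvStepA : Int × PySem.Dict Int Int × Int → Bool × Nat → Int × PySem.Dict Int Int × Int :=
  fun st g =>
    let q : Int := st.1 + (g.2 : Int)
    if !g.1 then (q, st.2.1.insert st.1 st.2.2, st.2.2 + 1)
    else (q, st.2.1, st.2.2)

def pvStepB (sc : String) : Int × Bool × Int × PySem.Dict Int Int → Char → Int × Bool × Int × PySem.Dict Int Int :=
  fun st c =>
    let isSplit := sc.toList == [c]
    if !isSplit && st.2.1 then (st.1 + 1, isSplit, st.2.2.1 + 1, st.2.2.2.insert st.1 st.2.2.1)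
    else (st.1 + 1, isSplit, st.2.2.1, st.2.2.2)

-- B's fold over a run of chars all with split-status k, entered with prev = k, only advances pos
lemma pvRun (sc : String) (k : Bool) :
    ∀ (l : List Char), (∀ x ∈ l, pvIsSplit sc x = k) →
      ∀ (pos ct : Int) (d : PySem.Dict Int Int),
        l.foldl (pvStepB sc) (pos, k, ct, d) = (pos + l.length, k, ct, d) := by
  intro l
  induction l with
  | nil => intro _ pos ct d; simp
  | cons x xs ih =>
    intro h pos ct d
    have hx : (sc.toList == [x]) = k := h x (by simp)
    have hxs : ∀ y ∈ xs, pvIsSplit sc y = k := fun y hy => h y (by simp [hy])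
    simp only [List.foldl_cons, pvStepB, hx]
    have hcond : (!k && k) = false := by cases k <;> rfl
    rw [hcond]
    simp only [Bool.false_eq_true, if_false]
    rw [ih hxs]
    have : pos + 1 + (xs.length : Int) = pos + ((xs.length + 1 : Nat) : Int) := by push_cast; ring
    simp only [List.length_cons, this]

-- the main invariant: B's character scan simulates A's fold over the groups
lemma pvSim (sc : String) :
    ∀ (n : Nat) (cs : List Char), cs.length ≤ n →
      ∀ (pos ct : Int) (prev : Bool) (d : PySem.Dict Int Int),
        (∀ c ∈ cs.head?, pvIsSplit sc c = false → prev = true) →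
        ∃ prevOut,
          cs.foldl (pvStepB sc) (pos, prev, ct, d)
            = (((pvGroups sc cs).foldl (pvStepA) (pos, d, ct)).1, prevOut,
               ((pvGroups sc cs).foldl (pvStepA) (pos, d, ct)).2.2,
               ((pvGroups sc cs).foldl (pvStepA) (pos, d, ct)).2.1) := by
  intro n
  induction n with
  | zero =>
    intro cs hlen pos ct prev d _
    have : cs = [] := List.length_eq_zero_iff.mp (Nat.le_zero.mp hlen)
    subst this
    exact ⟨prev, by simp [pvGroups]⟩
  | succ n ih =>
    intro cs hlen pos ct prev d hH
    match cs with
    | [] => exact ⟨prev, by simp [pvGroups]⟩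
    | c :: rest =>
      set k := pvIsSplit sc c with hk
      set run := rest.takeWhile (fun d => pvIsSplit sc d == k) with hrun
      set drop := rest.dropWhile (fun d => pvIsSplit sc d == k) with hdrop
      have hsplit : rest = run ++ drop := (List.takeWhile_append_dropWhile).symm
      have hrunall : ∀ x ∈ run, pvIsSplit sc x = k := by
        intro x hx
        have := List.mem_takeWhile_imp hx
        simpa using this
      have hdroplen : drop.length ≤ n := by
        have h1 : drop.length ≤ rest.length := List.length_dropWhile_le _ _
        have h2 : rest.length ≤ n := by simpa using Nat.succ_le_succ_iff.mp (by simpa using hlen)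
        omega
      have hdrophead : ∀ x ∈ drop.head?, pvIsSplit sc x ≠ k := by
        intro x hx
        have hfind : rest.find? (fun d => !(pvIsSplit sc d == k)) = drop.head? := by
          rw [hdrop]; exact List.find?_not_eq_head?_dropWhile (fun d => pvIsSplit sc d == k) rest
        rw [hx] at hfind
        have := List.find?_some hfind
        simpa using this
      have hgroups : pvGroups sc (c :: rest) = (k, run.length + 1) :: pvGroups sc drop := by
        rw [pvGroups]
      have hc : (sc.toList == [c]) = k := hk
      have hkc : pvIsSplit sc c = k := hk.symm
      by_cases hkk : k = true
      · -- split group: prev is irrelevant, no record on any char of the run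
        have hstep : pvStepB sc (pos, prev, ct, d) c = (pos + 1, k, ct, d) := by
          simp [pvStepB, hc, hkk]
        have hB : (c :: rest).foldl (pvStepB sc) (pos, prev, ct, d)
            = drop.foldl (pvStepB sc) (pos + 1 + run.length, k, ct, d) := by
          rw [List.foldl_cons, hstep]
          rw [hsplit, List.foldl_append, pvRun sc k run hrunall]
        have hH' : ∀ x ∈ drop.head?, pvIsSplit sc x = false → k = true := fun _ _ _ => hkk
        obtain ⟨po, hpo⟩ := ih drop hdroplen (pos + 1 + run.length) ct k d hH'
        refine ⟨po, ?_⟩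
        rw [hB, hpo, hgroups]
        have hA1 : pvStepA (pos, d, ct) (k, run.length + 1) = (pos + 1 + run.length, d, ct) := by
          simp [pvStepA, hkk]
          ring
        simp only [List.foldl_cons, hA1]
      · -- non-split group: entering it prev = true, record at the first char c
        have hkf : k = false := Bool.eq_false_iff.mpr hkk
        have hcf : pvIsSplit sc c = false := by rw [hkc, hkf]
        have hprev : prev = true := hH c (by simp) hcf
        have hstep : pvStepB sc (pos, prev, ct, d) c = (pos + 1, k, ct + 1, d.insert pos ct) := by
          simp only [pvStepB, hc, hkf, hprev]
          simp
        have hB : (c :: rest).foldl (pvStepB sc) (pos, prev, ct, d)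
            = drop.foldl (pvStepB sc) (pos + 1 + run.length, k, ct + 1, d.insert pos ct) := by
          rw [List.foldl_cons, hstep]
          rw [hsplit, List.foldl_append, pvRun sc k run hrunall]
        have hH' : ∀ x ∈ drop.head?, pvIsSplit sc x = false → k = true := by
          intro x hx hfx
          exact absurd (hkf ▸ (hfx ▸ hdrophead x hx)) (by simp)
        obtain ⟨po, hpo⟩ := ih drop hdroplen (pos + 1 + run.length) (ct + 1) k (d.insert pos ct) hH'
        refine ⟨po, ?_⟩
        rw [hB, hpo, hgroups]
        have hA1 : pvStepA (pos, d, ct) (k, run.length + 1)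
            = (pos + 1 + run.length, d.insert pos ct, ct + 1) := by
          simp [pvStepA, hkf]
          ring
        simp only [List.foldl_cons, hA1]

-- ===== VERDICT (by name: the statement is the Claim_ definition above) =====
theorem splitWithIndices_spec : Claim_equal_splitWithIndices := by
  intro string splitChar _
  unfold Spec_splitWithIndices splitWithIndices splitWithIndices_alt
  obtain ⟨po, hpo⟩ := pvSim splitChar string.toList.length string.toList (le_refl _)
      0 0 true PySem.Dict.empty (by intro _ _ _; rfl)
  show (((pvGroups splitChar string.toList).foldl (pvStepA) (0, PySem.Dict.empty, 0)).2.1).items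
      = ((string.toList.foldl (pvStepB splitChar) (0, true, 0, PySem.Dict.empty)).2.2.2).items
  rw [hpo]
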